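-- pv_equiv track=rewrite | github.com/JamieCFreeman/FAS1K_utils | make_synth_het.py | expand_set_het
-- ===== SOURCE A (Python) =====
-- het_dict= {
--     "R": {"A", "G"},
--     "Y": {"C", "T"},
--     "S": {"G", "C"},
--     "W": {"A", "T"},
--     "K": {"G", "T"},
--     "M": {"A", "C"}
--     }
--
-- def expand_set_het(s):
--     '''
--     For a set of nucleotides, expand heterozygous codes into
--     component nucleotides, and return expanded set of nucleotides
--     '''
--     het_sites = set(het_dict.keys()).intersection(s)
--     if len(het_sites) > 0:
--         for x in list(het_sites):
--             s = s.union(het_dict[x])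
--         return s - het_sites
--     elif len(het_sites) == 0:
--         return s
-- ===== SOURCE B (Python) =====
-- het_dict= {
--     "R": {"A", "G"},
--     "Y": {"C", "T"},
--     "S": {"G", "C"},
--     "W": {"A", "T"},
--     "K": {"G", "T"},
--     "M": {"A", "C"}
--     }
--
-- def expand_set_het(s):
--     '''
--     For a set of nucleotides, expand heterozygous codes into
--     component nucleotides, and return expanded set of nucleotides
--     '''
--     # Worklist rewriting: scan a worklist one symbol at a time; a het code is
--     # rewritten into its components (pushed onto the end of the worklist),
--     # anything else is emitted.  No intersection / union / difference algebra.
--     queue = list(s)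
--     out = set()
--     i = 0
--     while i < len(queue):
--         x = queue[i]
--         i += 1
--         if x in het_dict:
--             queue.extend(het_dict[x])
--         else:
--             out.add(x)
--     return out
-- ===== Notes on version B (the rewrite author's own statement) =====
-- stated objective: alternative
-- what changed: A computes the het subset with set algebra (intersection, repeated union rebinding, final set difference); B is a worklist rewriting algorithm: it scans a worklist one symbol at a time, rewrites a het code into its components pushed back onto the worklist, and emits anything else, with no intersection/union/difference step.
import Mathlib
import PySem

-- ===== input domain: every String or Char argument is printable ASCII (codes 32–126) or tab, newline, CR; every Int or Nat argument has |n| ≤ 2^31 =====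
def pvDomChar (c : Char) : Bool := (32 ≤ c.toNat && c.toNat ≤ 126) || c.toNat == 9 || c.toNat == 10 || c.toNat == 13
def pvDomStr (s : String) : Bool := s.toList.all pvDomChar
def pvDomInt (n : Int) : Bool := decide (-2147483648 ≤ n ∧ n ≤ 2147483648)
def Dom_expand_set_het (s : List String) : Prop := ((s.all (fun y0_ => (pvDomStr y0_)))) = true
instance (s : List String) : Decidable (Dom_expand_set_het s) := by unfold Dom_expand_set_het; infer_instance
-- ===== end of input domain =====

-- B replaces A's set algebra (intersection, repeated union, set difference) by a worklist
-- rewriting loop: pop a symbol, rewrite a het code into its components back onto the queue,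
-- emit anything else once (objective: alternative).

-- ===== PORT A =====
-- het_dict, a module constant: keys in literal order, values are set literals
def hetDict : PySem.Dict String (List String) :=
  PySem.Dict.ofList [("R", PySem.Set.ofList ["A","G"]), ("Y", PySem.Set.ofList ["C","T"]),
    ("S", PySem.Set.ofList ["G","C"]), ("W", PySem.Set.ofList ["A","T"]),
    ("K", PySem.Set.ofList ["G","T"]), ("M", PySem.Set.ofList ["A","C"])]

-- membership in hetDict as list membership in its key list (the B port's termination cites it)
theorem contains_hetDict (x : String) :
    hetDict.contains x = true ↔ x ∈ hetDict.keys := by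
  simp only [hetDict, PySem.Dict.ofList, PySem.Dict.contains, PySem.Dict.keys,
    List.any_eq_true, List.mem_map]
  constructor
  · rintro ⟨p, hp, he⟩; exact ⟨p, hp, (beq_iff_eq.mp he)⟩
  · rintro ⟨p, hp, he⟩; exact ⟨p, hp, beq_iff_eq.mpr he⟩

-- 'for x in list(het_sites)' and the intersection iterate Python sets (hash order, unmodelled);
-- the RESULT of A is the same set under any order, and the ports represent intermediate sets
-- in s's first-insertion order.
def expand_set_het (s : List String) : List String :=
  let het_sites := PySem.Set.inter s (PySem.Set.ofList hetDict.keys)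
  if het_sites.length > 0 then
    PySem.Set.diff (het_sites.foldl (fun t x => PySem.Set.union t (hetDict.getD x [])) s) het_sites
  else s

-- ===== PORT B =====
-- termination measure for the worklist: a het code weighs 3, anything else 1
def symWeight (x : String) : Nat := if hetDict.contains x then 3 else 1

-- the two components of any het key are not het keys themselves, so each weighs 1
theorem comps_weight : ∀ k ∈ hetDict.keys, ((hetDict.getD k []).map symWeight).sum = 2 := by
  decide

-- the cursor loop over the growing worklist, as recursion on the unscanned suffix;
-- 'out' is a Python set, so out.add is PySem.Set.add
def bLoop (queue : List String) (out : PySem.Set String) : List String :=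
  match queue with
  | [] => out
  | x :: q =>
    if h : hetDict.contains x = true then bLoop (q ++ hetDict.getD x []) out
    else bLoop q (PySem.Set.add out x)
termination_by (queue.map symWeight).sum
decreasing_by
  · have h2 := comps_weight x ((contains_hetDict x).mp h)
    simp only [List.map_append, List.sum_append, List.map_cons, List.sum_cons, symWeight, h,
      if_true]
    omega
  · simp only [List.map_cons, List.sum_cons, symWeight]
    split <;> omega

def expand_set_het_alt (s : List String) : List String :=
  bLoop s PySem.Set.empty

-- ===== PRECONDITION & SPEC =====
-- s encodes a Python set, so its List String encoding must hold distinct elements.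
def Pre_expand_set_het (s : List String) : Prop := s.Nodup
instance (s : List String) : Decidable (Pre_expand_set_het s) := by unfold Pre_expand_set_het; infer_instance
def pvWitness_expand_set_het : List String := ["R", "C"]

def Spec_expand_set_het (s : List String) (out : List String) : Prop := out = expand_set_het_alt s
instance (s : List String) (out : List String) : Decidable (Spec_expand_set_het s out) := by unfold Spec_expand_set_het; infer_instance

-- ===== CLAIM (what is proved, stated in full; the proofs are below) =====
def Claim_equal_expand_set_het : Prop := ∀ (s : List String), Dom_expand_set_het s → Pre_expand_set_het s → Spec_expand_set_het s (expand_set_het s)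

-- ===== LEMMAS AND PROOFS =====

-- no component nucleotide is a het key
theorem comp_not_key : ∀ k ∈ hetDict.keys, ∀ y ∈ hetDict.getD k [], hetDict.contains y = false := by
  decide

-- abbreviations used only by the proofs
def compsOf (q : List String) : List String :=
  (q.filter (fun x => hetDict.contains x)).flatMap (fun x => hetDict.getD x [])

theorem compsOf_not_key : ∀ q : List String, ∀ y ∈ compsOf q, hetDict.contains y = false := by
  intro q y hy
  rcases List.mem_flatMap.mp hy with ⟨k, hk, hyk⟩
  exact comp_not_key k ((contains_hetDict k).mp (List.of_mem_filter hk)) y hyk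

-- the worklist loop, flattened: process the original queue q (with trailing, already
-- non-het symbols c), ending as one fold of Set.add over kept symbols then components
theorem bLoop_eq : ∀ q c out : List String, (∀ x ∈ c, hetDict.contains x = false) →
    bLoop (q ++ c) out
      = (q.filter (fun x => !hetDict.contains x) ++ c ++ compsOf q).foldl PySem.Set.add out := by
  intro q
  induction q with
  | nil =>
    intro c
    induction c with
    | nil => intro out _; simp [bLoop, compsOf]
    | cons x c ihc =>
      intro out hc
      have hx := hc x (List.mem_cons_self ..)
      rw [List.nil_append, bLoop]
      simp only [hx, Bool.false_eq_true, dite_false]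
      have htl := fun y hy => hc y (List.mem_cons_of_mem _ hy)
      have := ihc (PySem.Set.add out x) htl
      rw [List.nil_append] at this
      simp only [this, compsOf, List.filter_nil, List.flatMap_nil,
        List.nil_append, List.append_nil, List.foldl_cons]
  | cons x q ih =>
    intro c out hc
    rw [List.cons_append, bLoop]
    by_cases hx : hetDict.contains x = true
    · simp only [hx, dite_true]
      have hcomps : ∀ y ∈ c ++ hetDict.getD x [], hetDict.contains y = false := by
        intro y hy
        rcases List.mem_append.mp hy with h | h
        · exact hc y h
        · exact comp_not_key x ((contains_hetDict x).mp hx) y h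
      have hassoc : q ++ c ++ hetDict.getD x [] = q ++ (c ++ hetDict.getD x []) := by
        simp [List.append_assoc]
      rw [hassoc, ih (c ++ hetDict.getD x []) out hcomps]
      simp [compsOf, hx, List.append_assoc]
    · simp only [hx, Bool.false_eq_true, dite_false]
      have hfilter : (x :: q).filter (fun y => !hetDict.contains y)
          = x :: q.filter (fun y => !hetDict.contains y) := by simp [hx]
      have hcomp : compsOf (x :: q) = compsOf q := by simp [compsOf, hx]
      rw [ih c (PySem.Set.add out x) hc, hfilter, hcomp]
      simp only [List.cons_append, List.foldl_cons]

-- two Set.add folds over the same (non-het) feed, starting from bases that agree on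
-- non-het membership, append the SAME new suffix
theorem foldl_add_pair : ∀ C a1 a2 : List String,
    (∀ x ∈ C, hetDict.contains x = false) →
    (∀ x, hetDict.contains x = false → (x ∈ a1 ↔ x ∈ a2)) →
    ∃ E, C.foldl PySem.Set.add a1 = a1 ++ E ∧ C.foldl PySem.Set.add a2 = a2 ++ E ∧
      ∀ x ∈ E, x ∈ C := by
  intro C
  induction C with
  | nil => intro a1 a2 _ _; exact ⟨[], by simp, by simp, by simp⟩
  | cons c C ih =>
    intro a1 a2 hC hag
    have hc := hC c (List.mem_cons_self ..)
    have hctl := fun y hy => hC y (List.mem_cons_of_mem _ hy)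
    by_cases hmem : c ∈ a1
    · have hmem2 : c ∈ a2 := (hag c hc).mp hmem
      rcases ih a1 a2 hctl hag with ⟨E, h1, h2, hE⟩
      exact ⟨E, by simpa [PySem.Set.add_of_mem hmem] using h1,
        by simpa [PySem.Set.add_of_mem hmem2] using h2,
        fun x hx => List.mem_cons_of_mem _ (hE x hx)⟩
    · have hmem2 : c ∉ a2 := fun h => hmem ((hag c hc).mpr h)
      have hag' : ∀ x, hetDict.contains x = false → (x ∈ a1 ++ [c] ↔ x ∈ a2 ++ [c]) := by
        intro x hx
        simp only [List.mem_append, List.mem_singleton]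
        exact or_congr_left (hag x hx)
      rcases ih (a1 ++ [c]) (a2 ++ [c]) hctl hag' with ⟨E, h1, h2, hE⟩
      refine ⟨c :: E, ?_, ?_, ?_⟩
      · rw [List.foldl_cons, PySem.Set.add_of_not_mem hmem, h1]; simp
      · rw [List.foldl_cons, PySem.Set.add_of_not_mem hmem2, h2]; simp
      · intro x hx
        rcases List.mem_cons.mp hx with rfl | hx
        · exact List.mem_cons_self ..
        · exact List.mem_cons_of_mem _ (hE x hx)

-- Set.contains of the key set agrees with Dict.contains
theorem contains_keys_eq (x : String) :
    PySem.Set.contains (PySem.Set.ofList hetDict.keys) x = hetDict.contains x := by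
  by_cases h : hetDict.contains x = true
  · rw [h, (PySem.Set.contains_iff ..).mpr]
    simpa using (contains_hetDict x).mp h
  · have h' : hetDict.contains x = false := by
      cases hc : hetDict.contains x
      · rfl
      · exact absurd hc h
    rw [h']
    cases hc : PySem.Set.contains (PySem.Set.ofList hetDict.keys) x
    · rfl
    · have := (PySem.Set.contains_iff ..).mp hc
      rw [PySem.Set.mem_ofList] at this
      exact absurd ((contains_hetDict x).mpr this) h

-- the fold of unions over het sites is one Set.add fold over the flattened components
theorem foldl_union_eq : ∀ (hs : List String) (t : List String),
    hs.foldl (fun t x => PySem.Set.union t (hetDict.getD x [])) t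
      = (hs.flatMap (fun x => hetDict.getD x [])).foldl PySem.Set.add t := by
  intro hs
  induction hs with
  | nil => intro t; rfl
  | cons x hs ih =>
    intro t
    rw [List.foldl_cons, List.flatMap_cons, List.foldl_append, ih]
    rfl

theorem main_eq (s : List String) (h : s.Nodup) : expand_set_het s = expand_set_het_alt s := by
  have hinter : PySem.Set.inter s (PySem.Set.ofList hetDict.keys)
      = s.filter (fun x => hetDict.contains x) := by
    show s.filter (fun x => PySem.Set.contains (PySem.Set.ofList hetDict.keys) x) = _
    exact List.filter_congr (fun x _ => contains_keys_eq x)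
  have hBfold : bLoop s PySem.Set.empty
      = (s.filter (fun x => !hetDict.contains x) ++ compsOf s).foldl PySem.Set.add [] := by
    have := bLoop_eq s [] [] (by simp)
    simpa [PySem.Set.empty] using this
  unfold expand_set_het expand_set_het_alt
  rw [hinter, hBfold]
  set P := s.filter (fun x => !hetDict.contains x) with hP
  set hs := s.filter (fun x => hetDict.contains x) with hhs
  have hCF : compsOf s = hs.flatMap (fun x => hetDict.getD x []) := by
    rw [compsOf, hhs]
  have hnodupP : P.Nodup := h.filter _
  -- B's value: one Set.add fold over the components, starting from the kept symbols P
  have hBval : ((P ++ compsOf s).foldl PySem.Set.add ([] : List String))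
      = (compsOf s).foldl PySem.Set.add P := by
    rw [List.foldl_append]
    have h1 : P.foldl PySem.Set.add [] = PySem.Set.ofList P := (PySem.Set.ofList_eq_foldl _).symm
    rw [h1, PySem.Set.ofList_eq_self_of_nodup _ hnodupP]
  rw [hBval]
  -- the agreement hypothesis for the paired fold
  have hag : ∀ x, hetDict.contains x = false → (x ∈ s ↔ x ∈ P) := by
    intro x hx
    rw [hP, List.mem_filter]
    simp [hx]
  have hCFnh : ∀ x ∈ compsOf s, hetDict.contains x = false := compsOf_not_key s
  by_cases hlen : hs.length > 0
  · rw [if_pos hlen, foldl_union_eq, ← hCF]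
    rcases foldl_add_pair (compsOf s) s P hCFnh hag with ⟨E, h1, h2, hE⟩
    rw [h1, h2]
    show (s ++ E).filter (fun x => !PySem.Set.contains hs x) = P ++ E
    rw [List.filter_append]
    have hsP : s.filter (fun x => !PySem.Set.contains hs x) = P := by
      rw [hP]
      apply List.filter_congr
      intro x hxs
      have : PySem.Set.contains hs x = hetDict.contains x := by
        by_cases hc : hetDict.contains x = true
        · rw [hc, (PySem.Set.contains_iff ..).mpr]
          rw [hhs]
          exact List.mem_filter.mpr ⟨hxs, hc⟩
        · have hc' : hetDict.contains x = false := by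
            cases hcc : hetDict.contains x
            · rfl
            · exact absurd hcc hc
          rw [hc']
          cases hcc : PySem.Set.contains hs x
          · rfl
          · have := (PySem.Set.contains_iff ..).mp hcc
            rw [hhs, List.mem_filter] at this
            exact absurd this.2 hc
      rw [this]
    have hsE : E.filter (fun x => !PySem.Set.contains hs x) = E := by
      apply List.filter_eq_self.mpr
      intro x hxE
      have hxnh := hCFnh x (hE x hxE)
      cases hcc : PySem.Set.contains hs x
      · rfl
      · have := (PySem.Set.contains_iff ..).mp hcc
        rw [hhs, List.mem_filter] at this
        rw [this.2] at hxnh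
        exact absurd hxnh (by simp)
    rw [hsP, hsE]
  · rw [if_neg hlen]
    have hempty : hs = [] := List.eq_nil_of_length_eq_zero (by omega)
    have hCF0 : compsOf s = [] := by rw [hCF, hempty]; rfl
    have hPs : P = s := by
      rw [hP]
      apply List.filter_eq_self.mpr
      intro x hxs
      cases hcc : hetDict.contains x
      · rfl
      · have : x ∈ hs := by
          rw [hhs]
          exact List.mem_filter.mpr ⟨hxs, hcc⟩
        rw [hempty] at this
        exact absurd this (List.not_mem_nil)
    rw [hCF0, hPs]
    rfl

-- ===== VERDICT (by name: the statement is the Claim_ definition above) =====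
theorem expand_set_het_spec : Claim_equal_expand_set_het := by
  intro s _ hpre
  unfold Spec_expand_set_het
  exact main_eq s hpre
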